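-- pv_equiv track=rewrite | github.com/kevinxperese/CS50 | problem-set-5/vanity_plates.py | ends_with_numeric
-- ===== SOURCE A (Python) =====
-- def ends_with_numeric(s):
--     has_num = False
--     for char in s:
--         if char.isnumeric():
--             has_num = True
--             continue
--         if has_num and char.isalpha():
--             return False
--     return s[-1].isnumeric()
-- ===== SOURCE B (Python) =====
-- def ends_with_numeric(s):
--     first_num = None
--     for i, char in enumerate(s):
--         if char.isnumeric():
--             first_num = i
--             break
--     last_alpha = None
--     for i, char in enumerate(s):
--         if char.isalpha():
--             last_alpha = i
--     if first_num is not None and last_alpha is not None and last_alpha > first_num: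
--         return False
--     return s[-1].isnumeric()
-- ===== Notes on version B (the rewrite author's own statement) =====
-- stated objective: alternative
-- what changed: Replaces A's single flag-tracking pass with early return by computing two landmarks (index of the first numeric char, index of the last alphabetic char) and comparing them once; falls through to s[-1].isnumeric() as A does.
import Mathlib
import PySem

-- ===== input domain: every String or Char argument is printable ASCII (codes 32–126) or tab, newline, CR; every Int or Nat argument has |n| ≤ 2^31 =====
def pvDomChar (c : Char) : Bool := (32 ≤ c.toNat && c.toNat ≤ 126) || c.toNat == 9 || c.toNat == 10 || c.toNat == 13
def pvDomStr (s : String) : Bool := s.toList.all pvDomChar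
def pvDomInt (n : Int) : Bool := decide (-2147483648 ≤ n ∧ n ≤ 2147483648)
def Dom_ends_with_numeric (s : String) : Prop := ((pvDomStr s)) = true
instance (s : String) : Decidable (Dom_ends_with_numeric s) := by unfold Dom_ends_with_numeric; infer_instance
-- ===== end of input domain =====

-- B replaces A's flag-tracking single pass by two landmark positions (first digit, last letter) compared once; objective: alternative decomposition, same cost.

-- ===== PORT A =====
-- early-return loop of A: `some false` = early `return False`, `none` = fall through
def pvLoopA : List Char → Bool → Option Bool
  | [], _ => none
  | c :: rest, has_num =>
    if PySem.Chars.isdigit c then pvLoopA rest true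
    else if has_num && PySem.Chars.isalpha c then some false
    else pvLoopA rest has_num

def ends_with_numeric (s : String) : Bool :=
  match pvLoopA s.toList false with
  | some b => b
  | none => ((PySem.Str.pyGet? s (-1)).map PySem.Chars.isdigit).getD false

-- ===== PORT B =====
-- first loop of B: index of the first numeric char
def pvFirstNum : List Char → Nat → Option Nat
  | [], _ => none
  | c :: rest, i => if PySem.Chars.isdigit c then some i else pvFirstNum rest (i + 1)

-- second loop of B: index of the last alphabetic char, kept in an accumulator
def pvLastAlpha : List Char → Nat → Option Nat → Option Nat
  | [], _, acc => acc
  | c :: rest, i, acc =>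
    pvLastAlpha rest (i + 1) (if PySem.Chars.isalpha c then some i else acc)

def ends_with_numeric_alt (s : String) : Bool :=
  let cs := s.toList
  match pvFirstNum cs 0, pvLastAlpha cs 0 none with
  | some i, some j =>
    if j > i then false
    else ((PySem.List.pyGet? cs (-1)).map PySem.Chars.isdigit).getD false
  | _, _ => ((PySem.List.pyGet? cs (-1)).map PySem.Chars.isdigit).getD false

-- ===== PRECONDITION & SPEC =====
-- Python A (and B) raise IndexError on the empty string at s[-1]; Pre_ excludes exactly that input.
def Pre_ends_with_numeric (s : String) : Prop := s ≠ ""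
instance (s : String) : Decidable (Pre_ends_with_numeric s) := by unfold Pre_ends_with_numeric; infer_instance
def pvWitness_ends_with_numeric : String := "a1"

def Spec_ends_with_numeric (s : String) (out : Bool) : Prop := out = ends_with_numeric_alt s
instance (s : String) (out : Bool) : Decidable (Spec_ends_with_numeric s out) := by unfold Spec_ends_with_numeric; infer_instance

-- ===== CLAIM (what is proved, stated in full; the proofs are below) =====
def Claim_equal_ends_with_numeric : Prop := ∀ (s : String), Dom_ends_with_numeric s → Pre_ends_with_numeric s → Spec_ends_with_numeric s (ends_with_numeric s)

-- ===== LEMMAS AND PROOFS =====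

-- a digit is never a letter
lemma digit_not_alpha (c : Char) (h : PySem.Chars.isdigit c = true) :
    PySem.Chars.isalpha c = false := by
  simp [PySem.Chars.isdigit, Char.le_def] at h
  simp [PySem.Chars.isalpha, PySem.Chars.isupper, PySem.Chars.islower, Char.le_def,
    UInt32.le_iff_toNat_le] at *
  omega

-- the common "an alpha occurs after the first digit" condition
def pvBad (cs : List Char) : Bool :=
  (cs.dropWhile (fun c => ! PySem.Chars.isdigit c)).any PySem.Chars.isalpha

lemma loopA_true (cs : List Char) :
    pvLoopA cs true = if cs.any PySem.Chars.isalpha then some false else none := by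
  induction cs with
  | nil => simp [pvLoopA]
  | cons c rest ih =>
    by_cases hd : PySem.Chars.isdigit c = true
    · simp [pvLoopA, hd, ih, digit_not_alpha c hd]
    · simp at hd
      by_cases ha : PySem.Chars.isalpha c = true
      · simp [pvLoopA, hd, ha]
      · simp at ha; simp [pvLoopA, hd, ha, ih]

lemma loopA_false (cs : List Char) :
    pvLoopA cs false = if pvBad cs then some false else none := by
  induction cs with
  | nil => simp [pvLoopA, pvBad]
  | cons c rest ih =>
    by_cases hd : PySem.Chars.isdigit c = true
    · simp [pvLoopA, hd, loopA_true, pvBad, List.dropWhile, digit_not_alpha c hd]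
    · simp at hd; simp [pvLoopA, hd, ih, pvBad, List.dropWhile]

lemma lastAlpha_acc (cs : List Char) : ∀ (i : Nat) (acc : Option Nat),
    pvLastAlpha cs i acc = (pvLastAlpha cs i none).or acc := by
  induction cs with
  | nil => intro i acc; simp [pvLastAlpha]
  | cons c rest ih =>
    intro i acc
    by_cases ha : PySem.Chars.isalpha c = true
    · simp only [pvLastAlpha, ha, if_pos]
      rw [ih (i+1) (some i)]
      cases pvLastAlpha rest (i+1) none <;> simp [Option.or]
    · simp at ha
      simp only [pvLastAlpha, ha, Bool.false_eq_true, if_neg, not_false_iff]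
      exact ih (i+1) acc

lemma lastAlpha_shift (cs : List Char) : ∀ (i : Nat),
    pvLastAlpha cs (i + 1) none = (pvLastAlpha cs i none).map (· + 1) := by
  induction cs with
  | nil => intro i; simp [pvLastAlpha]
  | cons c rest ih =>
    intro i
    by_cases ha : PySem.Chars.isalpha c = true
    · simp only [pvLastAlpha, ha, if_pos]
      rw [lastAlpha_acc rest (i+2) (some (i+1)), lastAlpha_acc rest (i+1) (some i),
        ih (i+1)]
      cases pvLastAlpha rest (i+1) none <;> simp [Option.or]
    · simp at ha
      simp only [pvLastAlpha, ha, Bool.false_eq_true, if_neg, not_false_iff]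
      exact ih (i+1)

lemma lastAlpha_isSome (cs : List Char) : ∀ (i : Nat),
    (pvLastAlpha cs i none).isSome = cs.any PySem.Chars.isalpha := by
  induction cs with
  | nil => intro i; simp [pvLastAlpha]
  | cons c rest ih =>
    intro i
    by_cases ha : PySem.Chars.isalpha c = true
    · simp only [pvLastAlpha, ha, if_pos]
      rw [lastAlpha_acc rest (i+1) (some i)]
      cases pvLastAlpha rest (i+1) none <;> simp [Option.or, ha]
    · simp at ha
      simp only [pvLastAlpha, ha, Bool.false_eq_true, if_neg, not_false_iff]
      simp [ih (i+1), ha]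

lemma firstNum_shift (cs : List Char) : ∀ (i : Nat),
    pvFirstNum cs (i + 1) = (pvFirstNum cs i).map (· + 1) := by
  induction cs with
  | nil => intro i; simp [pvFirstNum]
  | cons c rest ih =>
    intro i
    by_cases hd : PySem.Chars.isdigit c = true
    · simp [pvFirstNum, hd]
    · simp at hd; simp [pvFirstNum, hd, ih (i+1)]

-- B's landmark comparison computes exactly pvBad
lemma condB_eq_bad (cs : List Char) :
    (match pvFirstNum cs 0, pvLastAlpha cs 0 none with
     | some i, some j => decide (j > i)
     | _, _ => false) = pvBad cs := by
  induction cs with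
  | nil => simp [pvFirstNum, pvLastAlpha, pvBad]
  | cons c rest ih =>
    by_cases hd : PySem.Chars.isdigit c = true
    · have ha := digit_not_alpha c hd
      simp only [pvFirstNum, hd, if_pos, pvLastAlpha, ha, Bool.false_eq_true, if_neg,
        not_false_iff, pvBad, List.dropWhile, Bool.not_true, List.any_cons, ha,
        Bool.false_or]
      rw [lastAlpha_shift rest 0]
      rw [← lastAlpha_isSome rest 0]
      cases pvLastAlpha rest 0 none <;> simp
    · simp at hd
      by_cases ha : PySem.Chars.isalpha c = true
      · simp only [pvFirstNum, hd, Bool.false_eq_true, if_neg, not_false_iff,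
          pvLastAlpha, ha, if_pos, pvBad, List.dropWhile, Bool.not_false, hd]
        rw [firstNum_shift rest 0, lastAlpha_acc rest 1 (some 0), lastAlpha_shift rest 0]
        have hbr : (List.dropWhile (fun c => ! PySem.Chars.isdigit c) rest).any
            PySem.Chars.isalpha = pvBad rest := rfl
        rw [hbr, ← ih]
        cases hf : pvFirstNum rest 0 <;> cases hl : pvLastAlpha rest 0 none <;>
          simp [Option.or] <;> omega
      · simp at ha
        simp only [pvFirstNum, hd, Bool.false_eq_true, if_neg, not_false_iff,
          pvLastAlpha, ha, pvBad, List.dropWhile, Bool.not_false]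
        rw [firstNum_shift rest 0, lastAlpha_shift rest 0]
        have hbr : (List.dropWhile (fun c => ! PySem.Chars.isdigit c) rest).any
            PySem.Chars.isalpha = pvBad rest := rfl
        rw [hbr, ← ih]
        cases hf : pvFirstNum rest 0 <;> cases hl : pvLastAlpha rest 0 none <;>
          simp [Option.or] <;> omega

-- ===== VERDICT (by name: the statement is the Claim_ definition above) =====
theorem ends_with_numeric_spec : Claim_equal_ends_with_numeric := by
  intro s _ _
  unfold Spec_ends_with_numeric ends_with_numeric ends_with_numeric_alt
  rw [loopA_false]
  have h := condB_eq_bad s.toList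
  by_cases hb : pvBad s.toList = true
  · rw [hb] at h
    simp only [hb, if_pos]
    cases hf : pvFirstNum s.toList 0 <;> cases hl : pvLastAlpha s.toList 0 none <;>
      rw [hf, hl] at h <;> simp_all
  · simp at hb
    rw [hb] at h
    simp only [hb, Bool.false_eq_true, if_neg, not_false_iff]
    cases hf : pvFirstNum s.toList 0 <;> cases hl : pvLastAlpha s.toList 0 none <;>
      rw [hf, hl] at h <;> simp_all [PySem.Str.pyGet?]
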